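-- pv_equiv track=rewrite | github.com/sandysa/Environment_Shaping_NSE | src/domain_helper.py | ParseGrid_driving
-- ===== SOURCE A (Python) =====
-- def ParseGrid_driving(grid):
--     wall = []
--     regions = []
--     pothole = {}
--     pothole['S'] = [] #Shallow potholes
--     pothole['D'] = [] #Deep potholes
--     for r in range(len(grid)):
--         for c in range(len(grid[0])):
--             if grid[r][c] == "x":
--                 wall.append((r,c))
--             if grid[r][c] == "L":
--                 regions.append((r,c))
--             if grid[r][c] == "@":
--                 pothole['S'].append((r,c))
--             if grid[r][c] == "D":
--                 pothole['D'].append((r,c))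
--     return wall,pothole,regions, len(grid[0])-1, len(grid)-1
-- ===== SOURCE B (Python) =====
-- def ParseGrid_driving(grid):
--     R, C = len(grid), len(grid[0])
--     cells = [(r, c) for r in range(R) for c in range(C)]
--     wall = [p for p in cells if grid[p[0]][p[1]] == "x"]
--     regions = [p for p in cells if grid[p[0]][p[1]] == "L"]
--     pothole = {'S': [p for p in cells if grid[p[0]][p[1]] == "@"],
--                'D': [p for p in cells if grid[p[0]][p[1]] == "D"]}
--     return wall, pothole, regions, C - 1, R - 1
-- ===== Notes on version B (the rewrite author's own statement) =====
-- stated objective: simpler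
-- what changed: replaces the single fused scan that mutates four accumulators and a dict in one nested loop by a precomputed cell list and four independent filtering comprehensions, one per character class
import Mathlib
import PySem

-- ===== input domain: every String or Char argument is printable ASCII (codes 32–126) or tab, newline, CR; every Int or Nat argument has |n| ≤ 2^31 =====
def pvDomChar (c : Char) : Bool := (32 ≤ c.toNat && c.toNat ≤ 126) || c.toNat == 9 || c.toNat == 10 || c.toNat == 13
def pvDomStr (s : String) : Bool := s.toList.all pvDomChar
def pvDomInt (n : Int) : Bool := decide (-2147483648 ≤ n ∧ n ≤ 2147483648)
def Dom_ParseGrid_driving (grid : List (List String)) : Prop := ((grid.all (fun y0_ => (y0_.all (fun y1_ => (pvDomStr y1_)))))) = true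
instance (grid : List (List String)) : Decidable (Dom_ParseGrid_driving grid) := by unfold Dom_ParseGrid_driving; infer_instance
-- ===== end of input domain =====

-- B replaces A's single fused scan (one nested loop mutating wall/regions and a dict) by a
-- precomputed cell list and four independent filters, one per character class (objective: simpler).

-- ===== PORT A =====
-- loop body of A (the four sequential if-statements), as a named helper
def pvBodyA (grid : List (List String)) (st : (List (Int × Int)) × PySem.Dict String (List (Int × Int)) × (List (Int × Int))) (r c : Int) : (List (Int × Int)) × PySem.Dict String (List (Int × Int)) × (List (Int × Int)) :=
  let st := if PySem.List.pyGetD (PySem.List.pyGetD grid r []) c "" == "x" then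
    (st.1 ++ [(r, c)], st.2.1, st.2.2) else st
  let st := if PySem.List.pyGetD (PySem.List.pyGetD grid r []) c "" == "L" then
    (st.1, st.2.1, st.2.2 ++ [(r, c)]) else st
  let st := if PySem.List.pyGetD (PySem.List.pyGetD grid r []) c "" == "@" then
    (st.1, st.2.1.modify "S" [] (· ++ [(r, c)]), st.2.2) else st
  let st := if PySem.List.pyGetD (PySem.List.pyGetD grid r []) c "" == "D" then
    (st.1, st.2.1.modify "D" [] (· ++ [(r, c)]), st.2.2) else st
  st

def ParseGrid_driving (grid : List (List String)) : (List (Int × Int)) × (List (String × List (Int × Int))) × (List (Int × Int)) × Int × Int :=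
  let wall : List (Int × Int) := []
  let regions : List (Int × Int) := []
  let pothole : PySem.Dict String (List (Int × Int)) :=
    (PySem.Dict.empty.insert "S" []).insert "D" []
  let st :=
    (PySem.List.pyRange 0 (PySem.List.len grid) 1).foldl (fun st r =>
      (PySem.List.pyRange 0 (PySem.List.len (PySem.List.pyGetD grid 0 [])) 1).foldl (fun st c =>
        pvBodyA grid st r c) st) (wall, pothole, regions)
  (st.1, st.2.1.items, st.2.2, PySem.List.len (PySem.List.pyGetD grid 0 []) - 1, PySem.List.len grid - 1)

-- ===== PORT B =====
def ParseGrid_driving_alt (grid : List (List String)) : (List (Int × Int)) × (List (String × List (Int × Int))) × (List (Int × Int)) × Int × Int :=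
  let R := PySem.List.len grid
  let C := PySem.List.len (PySem.List.pyGetD grid 0 [])
  let cells := (PySem.List.pyRange 0 R 1).flatMap (fun r => (PySem.List.pyRange 0 C 1).map (fun c => (r, c)))
  let wall := cells.filter (fun p => PySem.List.pyGetD (PySem.List.pyGetD grid p.1 []) p.2 "" == "x")
  let regions := cells.filter (fun p => PySem.List.pyGetD (PySem.List.pyGetD grid p.1 []) p.2 "" == "L")
  let pothole : PySem.Dict String (List (Int × Int)) :=
    PySem.Dict.ofList [("S", cells.filter (fun p => PySem.List.pyGetD (PySem.List.pyGetD grid p.1 []) p.2 "" == "@")),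
                       ("D", cells.filter (fun p => PySem.List.pyGetD (PySem.List.pyGetD grid p.1 []) p.2 "" == "D"))]
  (wall, pothole.items, regions, C - 1, R - 1)

-- ===== PRECONDITION & SPEC =====
-- Pre_ excludes exactly the inputs where the Python A raises IndexError: the empty grid
-- (len(grid[0]) fails) and grids with a row shorter than row 0 (grid[r][c] fails).
def Pre_ParseGrid_driving (grid : List (List String)) : Prop :=
  grid ≠ [] ∧ ∀ row ∈ grid, (grid.headD []).length ≤ row.length
instance (grid : List (List String)) : Decidable (Pre_ParseGrid_driving grid) := by
  unfold Pre_ParseGrid_driving; infer_instance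
def pvWitness_ParseGrid_driving : List (List String) := [["x", "L"], ["@", "D"]]

def Spec_ParseGrid_driving (grid : List (List String)) (out : (List (Int × Int)) × (List (String × List (Int × Int))) × (List (Int × Int)) × Int × Int) : Prop := out = ParseGrid_driving_alt grid
instance (grid : List (List String)) (out : (List (Int × Int)) × (List (String × List (Int × Int))) × (List (Int × Int)) × Int × Int) : Decidable (Spec_ParseGrid_driving grid out) := by unfold Spec_ParseGrid_driving; infer_instance

-- ===== CLAIM (what is proved, stated in full; the proofs are below) =====
def Claim_equal_ParseGrid_driving : Prop := ∀ (grid : List (List String)), Dom_ParseGrid_driving grid → Pre_ParseGrid_driving grid → Spec_ParseGrid_driving grid (ParseGrid_driving grid)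

-- ===== LEMMAS AND PROOFS =====

theorem pvModS (s d : List (Int × Int)) (f : List (Int × Int) → List (Int × Int)) :
    (PySem.Dict.mk [("S", s), ("D", d)]).modify "S" [] f = PySem.Dict.mk [("S", f s), ("D", d)] := rfl

theorem pvModD (s d : List (Int × Int)) (f : List (Int × Int) → List (Int × Int)) :
    (PySem.Dict.mk [("S", s), ("D", d)]).modify "D" [] f = PySem.Dict.mk [("S", s), ("D", f d)] := rfl

-- A's fused loop over any cell list, started from the two-key dict, produces exactly the four filters.
theorem pvLoopEq (grid : List (List String)) (cells : List (Int × Int)) (w s d reg : List (Int × Int)) :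
    cells.foldl (fun st p => pvBodyA grid st p.1 p.2) (w, PySem.Dict.mk [("S", s), ("D", d)], reg)
      = (w ++ cells.filter (fun p => PySem.List.pyGetD (PySem.List.pyGetD grid p.1 []) p.2 "" == "x"),
         PySem.Dict.mk [("S", s ++ cells.filter (fun p => PySem.List.pyGetD (PySem.List.pyGetD grid p.1 []) p.2 "" == "@")),
                        ("D", d ++ cells.filter (fun p => PySem.List.pyGetD (PySem.List.pyGetD grid p.1 []) p.2 "" == "D"))],
         reg ++ cells.filter (fun p => PySem.List.pyGetD (PySem.List.pyGetD grid p.1 []) p.2 "" == "L")) := by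
  induction cells generalizing w s d reg with
  | nil => simp
  | cons p tl ih =>
    rw [List.foldl_cons]
    by_cases hx : PySem.List.pyGetD (PySem.List.pyGetD grid p.1 []) p.2 "" = "x"
    · have hb : pvBodyA grid (w, PySem.Dict.mk [("S", s), ("D", d)], reg) p.1 p.2
          = (w ++ [p], PySem.Dict.mk [("S", s), ("D", d)], reg) := by
        simp [pvBodyA, hx]
      rw [hb, ih]
      simp [hx, List.append_assoc]
    · by_cases hL : PySem.List.pyGetD (PySem.List.pyGetD grid p.1 []) p.2 "" = "L"
      · have hb : pvBodyA grid (w, PySem.Dict.mk [("S", s), ("D", d)], reg) p.1 p.2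
            = (w, PySem.Dict.mk [("S", s), ("D", d)], reg ++ [p]) := by
          simp [pvBodyA, hL]
        rw [hb, ih]
        simp [hL, List.append_assoc]
      · by_cases hS : PySem.List.pyGetD (PySem.List.pyGetD grid p.1 []) p.2 "" = "@"
        · have hb : pvBodyA grid (w, PySem.Dict.mk [("S", s), ("D", d)], reg) p.1 p.2
              = (w, PySem.Dict.mk [("S", s ++ [p]), ("D", d)], reg) := by
            simp [pvBodyA, hS, pvModS]
          rw [hb, ih]
          simp [hS, List.append_assoc]
        · by_cases hD : PySem.List.pyGetD (PySem.List.pyGetD grid p.1 []) p.2 "" = "D"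
          · have hb : pvBodyA grid (w, PySem.Dict.mk [("S", s), ("D", d)], reg) p.1 p.2
                = (w, PySem.Dict.mk [("S", s), ("D", d ++ [p])], reg) := by
              simp [pvBodyA, hD, pvModD]
            rw [hb, ih]
            simp [hD, List.append_assoc]
          · have hb : pvBodyA grid (w, PySem.Dict.mk [("S", s), ("D", d)], reg) p.1 p.2
                = (w, PySem.Dict.mk [("S", s), ("D", d)], reg) := by
              simp [pvBodyA, hx, hL, hS, hD]
            rw [hb, ih]
            simp [hx, hL, hS, hD]

theorem ParseGrid_driving_eq_alt (grid : List (List String)) :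
    ParseGrid_driving grid = ParseGrid_driving_alt grid := by
  unfold ParseGrid_driving ParseGrid_driving_alt
  have h := pvLoopEq grid
    ((PySem.List.pyRange 0 (PySem.List.len grid) 1).flatMap (fun r =>
      (PySem.List.pyRange 0 (PySem.List.len (PySem.List.pyGetD grid 0 [])) 1).map (fun c => (r, c))))
    [] [] [] []
  rw [List.foldl_flatMap] at h
  simp only [List.foldl_map, List.nil_append] at h
  rw [show ((PySem.Dict.empty.insert "S" ([] : List (Int × Int))).insert "D" [])
        = PySem.Dict.mk [("S", []), ("D", [])] from rfl]
  simp only [h]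
  rfl

-- ===== VERDICT (by name: the statement is the Claim_ definition above) =====
theorem ParseGrid_driving_spec : Claim_equal_ParseGrid_driving := by
  intro grid _ _
  unfold Spec_ParseGrid_driving
  exact ParseGrid_driving_eq_alt grid
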